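-- pv_equiv track=rewrite | github.com/Exital/musicAI | rnn_lstm/src/melody_generation.py | decode_to_parts
-- ===== SOURCE A (Python) =====
-- def decode_to_parts(song):
--     parts = []
--     part = []
--     for i in range(len(song[0].split(','))):
--         for timestep in song:
--             events = timestep.split(',')
--             part.append(events[i])
--         if not all(val == 'r' or val == '_' for val in part):
--             parts.append(part)
--         part = []
--     return parts
-- ===== SOURCE B (Python) =====
-- def decode_to_parts(song):
--     rows = [ts.split(',') for ts in song]
--     parts = []
--     while rows[0]:
--         col = [r[0] for r in rows]
--         rows = [r[1:] for r in rows]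
--         if not all(v == 'r' or v == '_' for v in col):
--             parts.append(col)
--     return parts
-- ===== Notes on version B (the rewrite author's own statement) =====
-- stated objective: alternative
-- what changed: Instead of A's index-driven double loop that re-splits every timestep for every column, B splits each timestep once and then peels columns off the front by head/tail consumption (col = heads, rows = tails) until the first row is exhausted, with no index arithmetic at all.
import Mathlib
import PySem

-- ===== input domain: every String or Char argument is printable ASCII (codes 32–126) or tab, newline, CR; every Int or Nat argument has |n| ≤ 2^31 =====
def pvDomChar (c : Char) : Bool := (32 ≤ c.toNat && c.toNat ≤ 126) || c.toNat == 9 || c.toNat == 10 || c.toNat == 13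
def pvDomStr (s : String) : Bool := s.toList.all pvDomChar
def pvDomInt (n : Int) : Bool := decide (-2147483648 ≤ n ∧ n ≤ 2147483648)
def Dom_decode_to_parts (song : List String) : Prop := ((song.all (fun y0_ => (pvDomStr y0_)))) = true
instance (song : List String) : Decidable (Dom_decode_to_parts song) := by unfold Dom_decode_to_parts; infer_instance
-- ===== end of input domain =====

-- B splits each timestep once and peels columns off the front by head/tail consumption instead of
-- A's index-driven double loop that re-splits per column (objective: alternative).

-- ===== PORT A =====
-- ts.split(',') — sep "," is nonempty so PySem.Str.split? always returns some (exact)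
def pvSplit (s : String) : List String := (PySem.Str.split? s ",").getD []

-- song[0] raises IndexError on empty song (excluded by Pre_); headI is its in-range transliteration.
-- events[i] raises when row i is too short (excluded by Pre_); pyGetD is its in-range transliteration.
def decode_to_parts (song : List String) : List (List String) :=
  let width := (pvSplit (song.headI)).length
  ((PySem.List.pyRange 0 width 1).foldl
    (fun (st : List (List String) × List String) i =>
      let part := song.foldl
        (fun part ts => part ++ [PySem.List.pyGetD (pvSplit ts) i ""]) st.2
      if !(part.all fun v => v == "r" || v == "_") then (st.1 ++ [part], [])
      else (st.1, []))
    ([], [])).1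

-- ===== PORT B =====
-- B's while loop: runs while rows[0] is nonempty (rows[0] on empty song raises, excluded by Pre_);
-- r[0] raises when some row runs out early (excluded by Pre_); headI/tail are the in-range
-- transliterations of r[0]/r[1:]. Terminates because the first row's tail shrinks.
def pvPeel (rows : List (List String)) : List (List String) :=
  if hh : rows.headI = [] then []
  else
    let col := rows.map List.headI
    let rows' := rows.map List.tail
    (if !(col.all fun v => v == "r" || v == "_") then [col] else []) ++ pvPeel rows'
termination_by rows.headI.length
decreasing_by
  cases rows with
  | nil => exact absurd rfl hh
  | cons r rs =>
    cases r with
    | nil => simp at hh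
    | cons x xs => simp

def decode_to_parts_alt (song : List String) : List (List String) :=
  pvPeel (song.map (fun ts => pvSplit ts))

-- ===== PRECONDITION & SPEC =====
-- Pre_ excludes exactly the inputs on which A raises IndexError: the empty song (song[0]) and
-- songs where some timestep splits into fewer fields than the first one (events[i]).
def Pre_decode_to_parts (song : List String) : Prop :=
  song ≠ [] ∧ ∀ ts ∈ song,
    (pvSplit (song.headI)).length ≤ (pvSplit ts).length
instance (song : List String) : Decidable (Pre_decode_to_parts song) := by
  unfold Pre_decode_to_parts; infer_instance
def pvWitness_decode_to_parts : List String := ["1,r", "2,_"]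

def Spec_decode_to_parts (song : List String) (out : List (List String)) : Prop :=
  out = decode_to_parts_alt song
instance (song : List String) (out : List (List String)) : Decidable (Spec_decode_to_parts song out) := by
  unfold Spec_decode_to_parts; infer_instance

-- ===== CLAIM (what is proved, stated in full; the proofs are below) =====
def Claim_equal_decode_to_parts : Prop := ∀ (song : List String), Dom_decode_to_parts song →
  Pre_decode_to_parts song → Spec_decode_to_parts song (decode_to_parts song)

-- ===== LEMMAS AND PROOFS =====

-- shape of A's outer loop: the part-accumulator is reset to [] each round, so the fold is a
-- filtered map of the per-index column
theorem foldA_shape (l : List Int) (acc : List (List String))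
    (g : List String → Int → List String) (p : List String → Bool) :
    ((l.foldl
      (fun (st : List (List String) × List String) i =>
        if p (g st.2 i) then (st.1 ++ [g st.2 i], []) else (st.1, []))
      (acc, [])).1)
    = acc ++ (l.map (fun i => g [] i)).filter p := by
  induction l generalizing acc with
  | nil => simp
  | cons i l ih =>
    simp only [List.foldl_cons, List.map_cons, List.filter_cons]
    by_cases h : p (g [] i)
    · simp [h, ih]
    · simp [h, ih]

theorem foldl_append_singleton {α β : Type} (xs : List α) (f : α → β) :
    ∀ acc : List β, xs.foldl (fun part x => part ++ [f x]) acc = acc ++ xs.map f := by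
  induction xs with
  | nil => simp
  | cons t ts ih => intro acc; simp [ih]

-- B's peeling loop, characterised: with every row at least as long as the first one, it produces
-- exactly the filtered columns indexed 0 .. headI.length - 1
theorem pvPeel_eq_columns (n : Nat) :
    ∀ rows : List (List String), rows.headI.length = n →
    (∀ r ∈ rows, n ≤ r.length) →
    pvPeel rows = ((List.range n).map (fun i => rows.map (fun r => r.getD i ""))).filter
      (fun col => !(col.all fun v => v == "r" || v == "_")) := by
  induction n with
  | zero =>
    intro rows h _
    have : rows.headI = [] := List.eq_nil_of_length_eq_zero h
    rw [pvPeel, dif_pos this]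
    simp
  | succ n ih =>
    intro rows h hlen
    obtain ⟨a, as, hhd⟩ : ∃ a as, rows.headI = a :: as := by
      cases hh : rows.headI with
      | nil => rw [hh] at h; simp at h
      | cons a as => exact ⟨a, as, rfl⟩
    rw [pvPeel, dif_neg (by simp [hhd])]
    dsimp only
    have hih : pvPeel (rows.map List.tail)
        = ((List.range n).map (fun i => (rows.map List.tail).map (fun r => r.getD i ""))).filter
          (fun col => !(col.all fun v => v == "r" || v == "_")) := by
      apply ih
      · cases rows with
        | nil => simp at hhd
        | cons r rs =>
          simp only [List.map_cons, List.headI_cons]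
          simp only [List.headI_cons] at hhd h
          rw [hhd] at h ⊢
          simpa using h
      · intro r hr
        obtain ⟨r0, hr0, rfl⟩ := List.mem_map.mp hr
        have := hlen r0 hr0
        cases r0 with
        | nil => simp at this
        | cons x xs => simp at this ⊢; omega
    rw [hih]
    -- heads are the 0-th entries; tails shift the index by one
    have hhead : rows.map List.headI = rows.map (fun r => r.getD 0 "") := by
      apply List.map_congr_left
      intro r hr
      have := hlen r hr
      cases r with
      | nil => simp at this
      | cons x xs => rfl
    have hshift : ∀ i : Nat,
        (rows.map List.tail).map (fun r => r.getD i "") = rows.map (fun r => r.getD (i+1) "") := by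
      intro i
      rw [List.map_map]
      apply List.map_congr_left
      intro r _
      cases r <;> rfl
    have hcols : List.map (fun i => List.map (fun r => r.getD i "") (List.map List.tail rows)) (List.range n)
        = List.map ((fun i => List.map (fun r => r.getD i "") rows) ∘ Nat.succ) (List.range n) := by
      apply List.map_congr_left
      intro i _
      simp [hshift i]
    rw [List.range_succ_eq_map, List.map_cons, List.filter_cons, List.map_map, hhead, hcols]
    by_cases hp : (!((rows.map (fun r => r.getD 0 "")).all fun v => v == "r" || v == "_")) = true
    · rw [if_pos hp, if_pos hp]
      rfl
    · rw [if_neg hp, if_neg hp]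
      exact List.nil_append _

-- ===== VERDICT (by name: the statement is the Claim_ definition above) =====
theorem decode_to_parts_spec : Claim_equal_decode_to_parts := by
  intro song _hDom hPre
  obtain ⟨hne, hlen⟩ := hPre
  unfold Spec_decode_to_parts decode_to_parts decode_to_parts_alt
  dsimp only
  set width := (pvSplit (song.headI)).length with hwidth
  -- B's peel over the once-split rows is the filtered columns of indices 0..width-1
  have hB : pvPeel (song.map (fun ts => pvSplit ts))
      = ((List.range width).map (fun i => (song.map (fun ts => pvSplit ts)).map (fun r => r.getD i ""))).filter
        (fun col => !(col.all fun v => v == "r" || v == "_")) := by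
    apply pvPeel_eq_columns
    · obtain ⟨t, rest, rfl⟩ := List.exists_cons_of_ne_nil hne
      simp [hwidth]
    · intro r hr
      obtain ⟨ts, hts, rfl⟩ := List.mem_map.mp hr
      exact hlen ts hts
  rw [hB]
  -- A's outer fold is a filtered map
  rw [foldA_shape (PySem.List.pyRange 0 (width : Int)) []
      (fun part i => song.foldl (fun part ts => part ++ [PySem.List.pyGetD (pvSplit ts) i ""]) part)
      (fun part => !(part.all fun v => v == "r" || v == "_"))]
  simp only [List.nil_append]
  congr 1
  -- the per-index columns coincide: pyRange over Int vs List.range over Nat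
  rw [PySem.List.pyRange_zero_nat, List.map_map]
  apply List.map_congr_left
  intro k hk
  rw [List.mem_range] at hk
  simp only [Function.comp]
  rw [foldl_append_singleton song (fun ts => PySem.List.pyGetD (pvSplit ts) ((k : Int)) "") []]
  simp only [List.nil_append, List.map_map]
  apply List.map_congr_left
  intro ts _hts
  simp only [Function.comp, PySem.List.pyGetD_natCast]
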